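-- pv_equiv track=rewrite | github.com/pypi-data/pypi-mirror-377 | packages/triangle-mesh-io/triangle_mesh_io-0.1.3.tar.gz/triangle_mesh_io-0.1.3/triangle_mesh_io/mesh/graph.py | faces_share_edge_independent_of_direction
-- ===== SOURCE A (Python) =====
-- def edges_have_same_vertices_independent_of_direction(edge_a, edge_b):
--     sa = sorted(edge_a)
--     sb = sorted(edge_b)
--     return sa == sb
--
-- def faces_share_edge_independent_of_direction(edges_a, edges_b):
--     ca = -1
--     cb = -1
--     do_share = False
--
--     for ia, ib in [
--         (0, 0),
--         (0, 1),
--         (0, 2),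
--         (1, 0),
--         (1, 1),
--         (1, 2),
--         (2, 0),
--         (2, 1),
--         (2, 2),
--     ]:
--         if edges_have_same_vertices_independent_of_direction(
--             edges_a[ia], edges_b[ib]
--         ):
--             ca = ia
--             cb = ib
--             do_share = True
--             break
--     return do_share, ca, cb
-- ===== SOURCE B (Python) =====
-- def faces_share_edge_independent_of_direction(edges_a, edges_b):
--     # Index edges_b once: canonical (sorted) edge -> its index; iterating ib in
--     # reverse makes the smallest ib win on duplicate edges, matching the
--     # break-at-first-ib order of a lexicographic scan.
--     table = {}
--     for ib in range(2, -1, -1):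
--         table[tuple(sorted(edges_b[ib]))] = ib
--     for ia in range(3):
--         key = tuple(sorted(edges_a[ia]))
--         if key in table:
--             return True, ia, table[key]
--     return False, -1, -1
-- ===== Notes on version B (the rewrite author's own statement) =====
-- stated objective: idiomatic
-- what changed: Replaces the hard-coded 3x3 nested index scan with a hash index built once over edges_b (canonical sorted-edge key -> smallest index) followed by a single pass over edges_a.
-- outside the precondition, e.g. on faces_share_edge_independent_of_direction([[1, 2]], [[2, 1]]): A returns (True, 0, 0), B raises IndexError
import Mathlib
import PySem

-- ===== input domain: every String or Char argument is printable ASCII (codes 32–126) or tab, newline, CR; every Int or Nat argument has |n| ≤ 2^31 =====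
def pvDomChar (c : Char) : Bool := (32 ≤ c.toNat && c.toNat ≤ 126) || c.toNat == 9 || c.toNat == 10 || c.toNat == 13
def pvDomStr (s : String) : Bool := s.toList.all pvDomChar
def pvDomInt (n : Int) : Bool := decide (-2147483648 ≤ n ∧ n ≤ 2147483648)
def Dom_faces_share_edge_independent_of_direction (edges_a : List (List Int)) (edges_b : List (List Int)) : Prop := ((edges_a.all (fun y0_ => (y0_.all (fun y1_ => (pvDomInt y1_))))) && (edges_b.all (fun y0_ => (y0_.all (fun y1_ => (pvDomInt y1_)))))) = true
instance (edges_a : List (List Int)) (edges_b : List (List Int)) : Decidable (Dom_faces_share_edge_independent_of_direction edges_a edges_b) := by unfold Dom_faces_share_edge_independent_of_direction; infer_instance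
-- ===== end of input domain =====

-- B replaces A's hard-coded 3x3 nested scan by a dict index over edges_b plus one pass over edges_a (idiomatic; same constant cost).

-- ===== PORT A =====
def pvEdgesSame (edge_a edge_b : List Int) : Bool :=
  PySem.List.sorted edge_a (fun x => x) == PySem.List.sorted edge_b (fun x => x)

def pvLoopA (edges_a edges_b : List (List Int)) : List (Int × Int) → Bool × Int × Int
  | [] => (false, -1, -1)
  | (ia, ib) :: rest =>
    if pvEdgesSame (PySem.List.pyGetD edges_a ia []) (PySem.List.pyGetD edges_b ib []) then
      (true, ia, ib)
    else pvLoopA edges_a edges_b rest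

def faces_share_edge_independent_of_direction (edges_a : List (List Int)) (edges_b : List (List Int)) : Bool × Int × Int :=
  pvLoopA edges_a edges_b [(0,0),(0,1),(0,2),(1,0),(1,1),(1,2),(2,0),(2,1),(2,2)]

-- ===== PORT B =====
def pvLoopB (table : PySem.Dict (List Int) Int) (edges_a : List (List Int)) : List Int → Bool × Int × Int
  | [] => (false, -1, -1)
  | ia :: rest =>
    let key := PySem.List.sorted (PySem.List.pyGetD edges_a ia []) (fun x => x)
    match table.get? key with
    | some v => (true, ia, v)
    | none => pvLoopB table edges_a rest

def faces_share_edge_independent_of_direction_alt (edges_a : List (List Int)) (edges_b : List (List Int)) : Bool × Int × Int :=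
  let table := (PySem.List.pyRange 2 (-1) (-1)).foldl
    (fun t ib => t.insert (PySem.List.sorted (PySem.List.pyGetD edges_b ib []) (fun x => x)) ib)
    PySem.Dict.empty
  pvLoopB table edges_a (PySem.List.pyRange 0 3 1)

-- ===== PRECONDITION & SPEC =====
-- Pre_ excludes inputs where either face has fewer than 3 edges: there A raises IndexError on indices 0..2
-- (except when an early match lets it return first), and B always raises while indexing all of edges_b.
def Pre_faces_share_edge_independent_of_direction (edges_a : List (List Int)) (edges_b : List (List Int)) : Prop :=
  3 ≤ edges_a.length ∧ 3 ≤ edges_b.length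
instance (edges_a : List (List Int)) (edges_b : List (List Int)) : Decidable (Pre_faces_share_edge_independent_of_direction edges_a edges_b) := by unfold Pre_faces_share_edge_independent_of_direction; infer_instance

def pvWitness_faces_share_edge_independent_of_direction : List (List Int) × List (List Int) :=
  ([[0, 1], [1, 2], [2, 0]], [[3, 1], [2, 1], [3, 2]])

def Spec_faces_share_edge_independent_of_direction (edges_a : List (List Int)) (edges_b : List (List Int)) (out : Bool × Int × Int) : Prop := out = faces_share_edge_independent_of_direction_alt edges_a edges_b
instance (edges_a : List (List Int)) (edges_b : List (List Int)) (out : Bool × Int × Int) : Decidable (Spec_faces_share_edge_independent_of_direction edges_a edges_b out) := by unfold Spec_faces_share_edge_independent_of_direction; infer_instance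

-- ===== CLAIM (what is proved, stated in full; the proofs are below) =====
def Claim_equal_faces_share_edge_independent_of_direction : Prop := ∀ (edges_a : List (List Int)) (edges_b : List (List Int)), Dom_faces_share_edge_independent_of_direction edges_a edges_b → Pre_faces_share_edge_independent_of_direction edges_a edges_b → Spec_faces_share_edge_independent_of_direction edges_a edges_b (faces_share_edge_independent_of_direction edges_a edges_b)

-- ===== LEMMAS AND PROOFS =====

theorem pv_main (a0 a1 a2 b0 b1 b2 : List Int) (ta tb : List (List Int)) :
    faces_share_edge_independent_of_direction (a0 :: a1 :: a2 :: ta) (b0 :: b1 :: b2 :: tb)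
      = faces_share_edge_independent_of_direction_alt (a0 :: a1 :: a2 :: ta) (b0 :: b1 :: b2 :: tb) := by
  have hrngb : PySem.List.pyRange 2 (-1) (-1) = [2, 1, 0] := by decide
  have hrnga : PySem.List.pyRange 0 3 1 = [0, 1, 2] := by decide
  have gA0 : PySem.List.pyGetD (a0 :: a1 :: a2 :: ta) 0 [] = a0 := PySem.List.pyGetD_zero_cons _ _ _
  have gA1 : PySem.List.pyGetD (a0 :: a1 :: a2 :: ta) 1 [] = a1 := by simp [PySem.List.pyGetD_ofNat']
  have gA2 : PySem.List.pyGetD (a0 :: a1 :: a2 :: ta) 2 [] = a2 := by simp [PySem.List.pyGetD_ofNat']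
  have gB0 : PySem.List.pyGetD (b0 :: b1 :: b2 :: tb) 0 [] = b0 := PySem.List.pyGetD_zero_cons _ _ _
  have gB1 : PySem.List.pyGetD (b0 :: b1 :: b2 :: tb) 1 [] = b1 := by simp [PySem.List.pyGetD_ofNat']
  have gB2 : PySem.List.pyGetD (b0 :: b1 :: b2 :: tb) 2 [] = b2 := by simp [PySem.List.pyGetD_ofNat']
  simp only [faces_share_edge_independent_of_direction,
    faces_share_edge_independent_of_direction_alt, hrngb, hrnga,
    List.foldl_cons, List.foldl_nil, pvLoopA, pvLoopB, pvEdgesSame,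
    gA0, gA1, gA2, gB0, gB1, gB2,
    PySem.Dict.get?_insert, PySem.Dict.get?_empty, beq_iff_eq]
  split_ifs <;> simp_all

-- ===== VERDICT (by name: the statement is the Claim_ definition above) =====
theorem faces_share_edge_independent_of_direction_spec : Claim_equal_faces_share_edge_independent_of_direction := by
  intro ea eb _ hpre
  obtain ⟨ha, hb⟩ := hpre
  match ea, eb with
  | a0 :: a1 :: a2 :: ta, b0 :: b1 :: b2 :: tb =>
    exact (pv_main a0 a1 a2 b0 b1 b2 ta tb)
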